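-- pv_equiv track=rewrite | github.com/zaidsaeed/Personal-Projects | Extensive 2-D list practice.py | v_check
-- ===== SOURCE A (Python) =====
-- def v_check(m): #checks from down to up
--     '''(2D List) --> 1Dlist/ 2D list
--     This function takes in a matrix as input
--     and returns four numbers if there is an
--     arithmetic progression in any of the matrix's columns.
--     If no arithmetic progression is detected horizontally, then
--     the inputted list is returned for further examinning.'''
--     if len(m) < 5:
--         return m
--     l = []
--     row = len(m)
--     column = len(m[0])
--     for i in range(0,column):
--         for j in range(0,row-4):
--             s1 = m[j+4][i] - m[j+3][i]
--             s2 = m[j+3][i] - m[j+2][i]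
--             s3 = m[j+2][i] - m[j+1][i]
--             s4 = m[j+1][i] - m[j][i]
--             if s1 == s2 == s3 == s4:
--                 for s in range(0,4):
--                     l.append([s+j, m[s+j].index(m[s+j][i])])
--                 return l
--     return m
-- ===== SOURCE B (Python) =====
-- def v_check(m):
--     if len(m) < 5:
--         return m
--     for i in range(len(m[0])):
--         col = [r[i] for r in m]
--         diffs = [col[k + 1] - col[k] for k in range(len(col) - 1)]
--         streak = 1
--         for k in range(1, len(diffs)):
--             if diffs[k] == diffs[k - 1]:
--                 streak += 1
--                 if streak == 4:
--                     j = k - 3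
--                     return [[j + s, m[j + s].index(m[j + s][i])] for s in range(4)]
--             else:
--                 streak = 1
--     return m
-- ===== Notes on version B (the rewrite author's own statement) =====
-- stated objective: alternative
-- what changed: Per column, B builds the list of consecutive differences once and scans it with a running streak counter of equal adjacent differences (returning when the streak reaches 4), instead of A's inner loop that recomputes four differences for every window start.
-- outside the precondition, e.g. on v_check([[1], [2], [3], [4], [5], []]): A returns [[0, 0], [1, 0], [2, 0], [3, 0]], B raises IndexError
import Mathlib
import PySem

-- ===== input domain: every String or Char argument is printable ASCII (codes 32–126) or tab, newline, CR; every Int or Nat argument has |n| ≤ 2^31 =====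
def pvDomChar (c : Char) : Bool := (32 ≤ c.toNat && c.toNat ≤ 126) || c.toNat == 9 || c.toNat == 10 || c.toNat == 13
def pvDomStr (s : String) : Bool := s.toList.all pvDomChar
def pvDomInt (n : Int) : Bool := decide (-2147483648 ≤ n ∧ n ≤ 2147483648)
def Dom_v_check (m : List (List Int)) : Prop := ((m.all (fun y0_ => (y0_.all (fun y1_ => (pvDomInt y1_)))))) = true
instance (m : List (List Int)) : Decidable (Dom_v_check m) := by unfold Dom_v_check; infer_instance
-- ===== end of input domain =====

-- B replaces A's recompute-four-differences window loop by a per-column difference table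
-- scanned once with a streak counter (alternative decomposition, same cost).


-- ===== PORT A =====
-- the four entries appended in A's inner 'for s in range(0,4)' loop (list.index = PySem.List.index?;
-- the element is present under Pre_, so .getD 0 is exact there)
def vEntryA (m : List (List Int)) (i j s : Nat) : List Int :=
  [((s + j : Nat) : Int),
   (((PySem.List.index? (m.getD (s + j) []) ((m.getD (s + j) []).getD i 0)).getD 0 : Nat) : Int)]

def vEntriesA (m : List (List Int)) (i j : Nat) : List (List Int) :=
  (List.range 4).foldl (fun l s => l ++ [vEntryA m i j s]) []

-- A's condition s1 == s2 == s3 == s4 (indexing m[x][i] is exact under Pre_, where all reads are in range)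
def vCondA (m : List (List Int)) (i j : Nat) : Bool :=
  let g := fun k => (m.getD k []).getD i 0
  decide (g (j+4) - g (j+3) = g (j+3) - g (j+2)) &&
  decide (g (j+3) - g (j+2) = g (j+2) - g (j+1)) &&
  decide (g (j+2) - g (j+1) = g (j+1) - g j)

-- inner 'for j in range(0, row-4)' with early return of j
def vInnerA (m : List (List Int)) (i : Nat) : List Nat → Option Nat
  | [] => none
  | j :: js => if vCondA m i j then some j else vInnerA m i js

-- outer 'for i in range(0, column)' with early return of l
def vOuterA (m : List (List Int)) : List Nat → Option (List (List Int))
  | [] => none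
  | i :: is =>
    match vInnerA m i (List.range (m.length - 4)) with
    | some j => some (vEntriesA m i j)
    | none => vOuterA m is

def v_check (m : List (List Int)) : List (List Int) :=
  if m.length < 5 then m
  else
    match vOuterA m (List.range (m.getD 0 []).length) with
    | some l => l
    | none => m

-- ===== PORT B =====
-- col = [r[i] for r in m]  (r[i] exact under Pre_)
def vColB (m : List (List Int)) (i : Nat) : List Int :=
  m.map (fun r => r.getD i 0)

-- diffs = [col[k+1] - col[k] for k in range(len(col)-1)]
def vDiffsB (c : List Int) : List Int :=
  (List.range (c.length - 1)).map (fun k => c.getD (k + 1) 0 - c.getD k 0)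

-- the returned comprehension [[j+s, m[j+s].index(m[j+s][i])] for s in range(4)]
def vEntriesB (m : List (List Int)) (i j : Nat) : List (List Int) :=
  (List.range 4).map (fun s =>
    [((j + s : Nat) : Int),
     (((PySem.List.index? (m.getD (j + s) []) ((m.getD (j + s) []).getD i 0)).getD 0 : Nat) : Int)])

-- 'for k in range(1, len(diffs))' with the streak accumulator
def vScanB (d : List Int) : List Nat → Nat → Option Nat
  | [], _ => none
  | k :: ks, streak =>
    if d.getD k 0 = d.getD (k - 1) 0 then
      if streak + 1 = 4 then some (k - 3) else vScanB d ks (streak + 1)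
    else vScanB d ks 1

def vOuterB (m : List (List Int)) : List Nat → Option (List (List Int))
  | [] => none
  | i :: is =>
    let d := vDiffsB (vColB m i)
    match vScanB d (List.range' 1 (d.length - 1)) 1 with
    | some j => some (vEntriesB m i j)
    | none => vOuterB m is

def v_check_alt (m : List (List Int)) : List (List Int) :=
  if m.length < 5 then m
  else
    match vOuterB m (List.range (m.headD []).length) with
    | some l => l
    | none => m

-- ===== PRECONDITION & SPEC =====
-- Pre_ excludes ragged matrices with ≥5 rows in which some row is shorter than row 0: there the
-- Python programs index past a row's end and (in general) raise IndexError; on the few such inputs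
-- where A still returns (a progression found before the short row's column is reached) B raises.
def Pre_v_check (m : List (List Int)) : Prop :=
  m.length < 5 ∨ ∀ r ∈ m, (m.headD []).length ≤ r.length
instance (m : List (List Int)) : Decidable (Pre_v_check m) := by unfold Pre_v_check; infer_instance

def pvWitness_v_check : List (List Int) := [[1], [2], [3], [4], [6]]

def Spec_v_check (m : List (List Int)) (out : List (List Int)) : Prop := out = v_check_alt m
instance (m : List (List Int)) (out : List (List Int)) : Decidable (Spec_v_check m out) := by unfold Spec_v_check; infer_instance

-- ===== CLAIM (what is proved, stated in full; the proofs are below) =====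
def Claim_equal_v_check : Prop := ∀ (m : List (List Int)), Dom_v_check m → Pre_v_check m → Spec_v_check m (v_check m)

-- ===== LEMMAS AND PROOFS =====

-- value of column i at row k, as both ports read it
def vG (m : List (List Int)) (i k : Nat) : Int := (m.getD k []).getD i 0

-- difference of column i between rows k and k+1
def vD (m : List (List Int)) (i k : Nat) : Int := vG m i (k + 1) - vG m i k

-- 'the k-th difference equals the (k-1)-st'
def vEq (m : List (List Int)) (i k : Nat) : Bool := decide (vD m i k = vD m i (k - 1))

-- A's window condition at start j, in terms of vEq
def vWin (m : List (List Int)) (i j : Nat) : Bool :=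
  vEq m i (j + 3) && vEq m i (j + 2) && vEq m i (j + 1)

theorem vCondA_eq_win (m : List (List Int)) (i j : Nat) : vCondA m i j = vWin m i j := by
  simp [vCondA, vWin, vEq, vD, vG, Bool.and_assoc]

theorem vInnerA_eq_find (m : List (List Int)) (i : Nat) (L : List Nat) :
    vInnerA m i L = L.find? (vCondA m i) := by
  induction L with
  | nil => rfl
  | cons j js ih => by_cases h : vCondA m i j <;> simp [vInnerA, List.find?, h, ih]

theorem find?_congr' {p q : Nat → Bool} (L : List Nat) (h : ∀ x ∈ L, p x = q x) :
    L.find? p = L.find? q := by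
  induction L with
  | nil => rfl
  | cons a l ih =>
    have ha := h a (by simp)
    by_cases hp : p a
    · simp [List.find?, hp, ha ▸ hp]
    · have : q a = false := by rw [← ha]; simpa using hp
      simp [List.find?, hp, this, ih (fun x hx => h x (by simp [hx]))]

theorem find?_range'_eq_some {p : Nat → Bool} (j : Nat) (hp : p j = true)
    (hmin : ∀ t, t < j → p t = false) :
    ∀ c a, a ≤ j → j < a + c → (List.range' a c).find? p = some j := by
  intro c
  induction c with
  | zero => intro a h1 h2; omega
  | succ c ih =>
    intro a h1 h2
    rw [List.range'_succ]
    by_cases ha : a = j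
    · subst ha; rw [List.find?_cons_of_pos hp]
    · have hpa : p a = false := hmin a (by omega)
      rw [List.find?_cons_of_neg (by simp [hpa])]
      exact ih (a + 1) (by omega) (by omega)

theorem colB_getD (m : List (List Int)) (i k : Nat) :
    (vColB m i)[k]?.getD 0 = vG m i k := by
  cases h : m[k]? with
  | none => simp [vColB, vG, List.getD, List.getElem?_map, h]
  | some r => simp [vColB, vG, List.getD, List.getElem?_map, h]

theorem diffsB_getD (m : List (List Int)) (i k : Nat) (hk : k < m.length - 1) :
    (vDiffsB (vColB m i)).getD k 0 = vD m i k := by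
  have hlen : (vColB m i).length = m.length := by simp [vColB]
  have hk' : k < (vColB m i).length - 1 := by omega
  simp [vDiffsB, List.getD, List.getElem?_map, List.getElem?_range hk', vD, colB_getD]

theorem diffsB_length (m : List (List Int)) (i : Nat) :
    (vDiffsB (vColB m i)).length = m.length - 1 := by
  simp [vDiffsB, vColB]

-- the core invariant of B's streak scan: it finds exactly the first window start
theorem scan_spec (m : List (List Int)) (i : Nat) :
    ∀ (c k0 s : Nat),
      1 ≤ s → s ≤ 3 → s ≤ k0 →
      k0 + c ≤ m.length - 1 →
      (∀ t, 1 ≤ t → t < s → vEq m i (k0 - t) = true) →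
      (s < 3 → k0 = s ∨ vEq m i (k0 - s) = false) →
      (∀ j, j + 3 < k0 → vWin m i j = false) →
      vScanB (vDiffsB (vColB m i)) (List.range' k0 c) s =
        (List.range (k0 + c - 3)).find? (vWin m i) := by
  intro c
  induction c with
  | zero =>
    intro k0 s _ _ _ _ _ _ hnw
    have hz : vScanB (vDiffsB (vColB m i)) (List.range' k0 0) s = none := rfl
    rw [hz]
    symm
    rw [List.find?_eq_none]
    intro j hj
    have hj3 : j + 3 < k0 := by
      have := List.mem_range.mp hj
      omega
    simp [hnw j hj3]
  | succ c ih =>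
    intro k0 s hs1 hs3 hsk hbound hback hneg hnw
    rw [List.range'_succ]
    simp only [vScanB]
    have hEqIff : ((vDiffsB (vColB m i)).getD k0 0 = (vDiffsB (vColB m i)).getD (k0 - 1) 0)
        ↔ vEq m i k0 = true := by
      rw [diffsB_getD m i k0 (by omega), diffsB_getD m i (k0 - 1) (by omega)]
      simp [vEq]
    by_cases hb : (vDiffsB (vColB m i)).getD k0 0 = (vDiffsB (vColB m i)).getD (k0 - 1) 0
    · have heq : vEq m i k0 = true := hEqIff.mp hb
      rw [if_pos hb]
      by_cases hs : s + 1 = 4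
      · -- streak reaches 4: first window starts at k0 - 3
        have hs3' : s = 3 := by omega
        have hk3 : 3 ≤ k0 := by omega
        have hwin : vWin m i (k0 - 3) = true := by
          have h1 : vEq m i (k0 - 1) = true := hback 1 (by omega) (by omega)
          have h2 : vEq m i (k0 - 2) = true := hback 2 (by omega) (by omega)
          have e3 : k0 - 3 + 3 = k0 := by omega
          have e2 : k0 - 3 + 2 = k0 - 1 := by omega
          have e1 : k0 - 3 + 1 = k0 - 2 := by omega
          simp [vWin, e3, e2, e1, heq, h1, h2]
        have hmin : ∀ t, t < k0 - 3 → vWin m i t = false := fun t ht => hnw t (by omega)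
        rw [if_pos hs]
        symm
        rw [List.range_eq_range']
        exact find?_range'_eq_some (k0 - 3) hwin hmin (k0 + (c + 1) - 3) 0 (by omega) (by omega)
      · rw [if_neg hs]
        have hs2 : s ≤ 2 := by omega
        have hnw' : ∀ j, j + 3 < k0 + 1 → vWin m i j = false := by
          intro j hj
          by_cases hj3 : j + 3 = k0
          · -- window ending exactly at k0 is broken by the negative part of the invariant
            have hk3 : 3 ≤ k0 := by omega
            rcases hneg (by omega) with hk | hf
            · omega
            · rcases Nat.lt_or_ge s 2 with h1 | h2
              · have hs1' : s = 1 := by omega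
                have : vEq m i (j + 2) = false := by
                  have : k0 - 1 = j + 2 := by omega
                  rw [← this]; simpa [hs1'] using hf
                simp [vWin, this]
              · have hs2' : s = 2 := by omega
                have : vEq m i (j + 1) = false := by
                  have : k0 - 2 = j + 1 := by omega
                  rw [← this]; simpa [hs2'] using hf
                simp [vWin, this]
          · exact hnw j (by omega)
        have hback' : ∀ t, 1 ≤ t → t < s + 1 → vEq m i (k0 + 1 - t) = true := by
          intro t ht1 hts
          by_cases ht : t = 1
          · subst ht; simpa using heq
          · have e : k0 + 1 - t = k0 - (t - 1) := by omega
            rw [e]; exact hback (t - 1) (by omega) (by omega)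
        have hneg' : s + 1 < 3 → k0 + 1 = s + 1 ∨ vEq m i (k0 + 1 - (s + 1)) = false := by
          intro h
          have hs1' : s = 1 := by omega
          rcases hneg (by omega) with hk | hf
          · left; omega
          · right
            have e : k0 + 1 - (s + 1) = k0 - s := by omega
            rw [e]; exact hf
        rw [show k0 + (c + 1) - 3 = k0 + 1 + c - 3 from by omega]
        exact ih (k0 + 1) (s + 1) (by omega) (by omega) (by omega) (by omega)
          hback' hneg' hnw'
    · rw [if_neg hb]
      have heq : vEq m i k0 = false := by
        by_contra hc
        exact hb (hEqIff.mpr (by simpa using hc))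
      have hnw' : ∀ j, j + 3 < k0 + 1 → vWin m i j = false := by
        intro j hj
        by_cases hj3 : j + 3 = k0
        · rw [← hj3] at heq; simp [vWin, heq]
        · exact hnw j (by omega)
      have hneg' : (1 : Nat) < 3 → k0 + 1 = 1 ∨ vEq m i (k0 + 1 - 1) = false := by
        intro _; right; simpa using heq
      rw [show k0 + (c + 1) - 3 = k0 + 1 + c - 3 from by omega]
      exact ih (k0 + 1) 1 (by omega) (by omega) (by omega) (by omega)
        (by intro t ht1 hts; omega) hneg' hnw'

theorem entries_eq (m : List (List Int)) (i j : Nat) :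
    vEntriesA m i j = vEntriesB m i j := by
  simp [vEntriesA, vEntriesB, vEntryA, List.range_succ, Nat.add_comm]

theorem inner_eq (m : List (List Int)) (i : Nat) (h5 : 5 ≤ m.length) :
    vInnerA m i (List.range (m.length - 4)) =
      vScanB (vDiffsB (vColB m i)) (List.range' 1 ((vDiffsB (vColB m i)).length - 1)) 1 := by
  rw [diffsB_length]
  rw [scan_spec m i (m.length - 1 - 1) 1 1 (by omega) (by omega) (by omega) (by omega)
    (by intro t ht1 hts; omega) (by intro _; left; rfl) (by intro j hj; omega)]
  rw [vInnerA_eq_find]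
  rw [show 1 + (m.length - 1 - 1) - 3 = m.length - 4 from by omega]
  exact find?_congr' _ (fun x _ => vCondA_eq_win m i x)

theorem outer_eq (m : List (List Int)) (h5 : 5 ≤ m.length) (L : List Nat) :
    vOuterA m L = vOuterB m L := by
  induction L with
  | nil => rfl
  | cons i is ih =>
    simp only [vOuterA, vOuterB]
    rw [← inner_eq m i h5]
    cases h : vInnerA m i (List.range (m.length - 4)) with
    | none => simpa using ih
    | some j => simp [entries_eq]

-- ===== VERDICT (by name: the statement is the Claim_ definition above) =====
theorem v_check_spec : Claim_equal_v_check := by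
  intro m _ _
  unfold Spec_v_check v_check v_check_alt
  by_cases h : m.length < 5
  · simp [h]
  · have h5 : 5 ≤ m.length := by omega
    have hh : m.getD 0 [] = m.headD [] := by cases m <;> rfl
    rw [if_neg h, if_neg h, hh, outer_eq m h5]
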